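-- pv_equiv track=rewrite | github.com/MrBrantCode/unitest_baseline | mut_generate/mist_train_cf/cf_93047/solution.py | last_three_primes
-- ===== SOURCE A (Python) =====
-- def is_prime(n):
--     if n <= 1:
--         return False
--     for i in range(2, int(n**0.5) + 1):
--         if n % i == 0:
--             return False
--     return True
--
-- def last_three_primes(numbers):
--     primes = []
--     for num in reversed(numbers):
--         if is_prime(num):
--             primes.append(num)
--         if len(primes) == 3:
--             break
--     return primes
-- ===== SOURCE B (Python) =====
-- def is_prime(n):
--     if n <= 1:
--         return False
--     for i in range(2, int(n**0.5) + 1):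
--         if n % i == 0:
--             return False
--     return True
--
-- def last_three_primes(numbers):
--     all_primes = [x for x in numbers if is_prime(x)]
--     return all_primes[-3:][::-1]
-- ===== Notes on version B (the rewrite author's own statement) =====
-- stated objective: simpler
-- what changed: B replaces A's reverse scan with an early break and mutable accumulator by a single forward filter of all primes followed by a last-three slice and reversal.
import Mathlib
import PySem

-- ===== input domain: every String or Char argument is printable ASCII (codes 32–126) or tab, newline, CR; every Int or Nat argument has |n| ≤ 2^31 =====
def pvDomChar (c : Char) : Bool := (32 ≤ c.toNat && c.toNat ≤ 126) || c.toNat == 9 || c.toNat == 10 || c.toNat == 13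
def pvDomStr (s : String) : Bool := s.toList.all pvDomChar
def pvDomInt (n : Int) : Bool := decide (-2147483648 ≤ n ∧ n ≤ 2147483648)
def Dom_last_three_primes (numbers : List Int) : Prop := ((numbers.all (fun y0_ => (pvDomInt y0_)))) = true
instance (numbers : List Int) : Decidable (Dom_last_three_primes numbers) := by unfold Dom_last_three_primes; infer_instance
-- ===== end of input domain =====

-- B is the same filter-by-is_prime task as a forward comprehension plus a last-three slice reversed; simpler decomposition, return value only.

-- ===== PORT A =====
-- shared helper: both Pythons carry the byte-identical is_prime.
-- int(n**0.5) is ported as Nat.sqrt: exact here since n ≤ 2^31 < 2^52 and any rounding-up by one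
-- only adds a non-dividing trial divisor, leaving is_prime's value unchanged on the domain.
def pvIsPrime (n : Int) : Bool :=
  if n ≤ 1 then false
  else (PySem.List.pyRange 2 (Int.ofNat (Nat.sqrt n.toNat) + 1) 1).all
         (fun i => !(PySem.Int.mod n i == 0))

-- A's loop over reversed(numbers) with append and break at length 3
def pvLoopA : List Int → List Int → List Int
  | [], primes => primes
  | num :: rest, primes =>
      let primes' := if pvIsPrime num then primes ++ [num] else primes
      if primes'.length = 3 then primes' else pvLoopA rest primes'

def last_three_primes (numbers : List Int) : List Int :=
  pvLoopA numbers.reverse []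

-- ===== PORT B =====
def last_three_primes_alt (numbers : List Int) : List Int :=
  let all_primes := numbers.filter pvIsPrime
  -- all_primes[-3:][::-1] : last-three slice, then reverse ([::-1])
  (PySem.List.slice all_primes (some (-3)) none).reverse

-- ===== PRECONDITION & SPEC =====
def Spec_last_three_primes (numbers : List Int) (out : List Int) : Prop := out = last_three_primes_alt numbers
instance (numbers : List Int) (out : List Int) : Decidable (Spec_last_three_primes numbers out) := by unfold Spec_last_three_primes; infer_instance

-- ===== CLAIM (what is proved, stated in full; the proofs are below) =====
def Claim_equal_last_three_primes : Prop := ∀ (numbers : List Int), Dom_last_three_primes numbers → Spec_last_three_primes numbers (last_three_primes numbers)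

-- ===== LEMMAS AND PROOFS =====

-- A's loop takes the first (3 - |acc|) primes of the remaining list, appended to acc.
theorem pvLoopA_eq (l : List Int) : ∀ acc : List Int, acc.length < 3 →
    pvLoopA l acc = acc ++ (l.filter pvIsPrime).take (3 - acc.length) := by
  induction l with
  | nil => intro acc _; simp [pvLoopA]
  | cons num rest ih =>
      intro acc hacc
      by_cases hp : pvIsPrime num
      · simp only [pvLoopA, hp, if_pos, List.length_append, List.length_singleton]
        by_cases h3 : acc.length + 1 = 3
        · have ht : 3 - acc.length = 1 := by omega
          simp [h3, hp, ht]
        · rw [if_neg h3, ih (acc ++ [num])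
                (by simp only [List.length_append, List.length_cons, List.length_nil]; omega)]
          have h1 : 3 - (acc ++ [num]).length = 2 - acc.length := by
            simp only [List.length_append, List.length_cons, List.length_nil]; omega
          have hk : 3 - acc.length = (2 - acc.length) + 1 := by omega
          simp [hp, hk]
      · have hne : acc.length ≠ 3 := by omega
        simp [pvLoopA, hp, hne, ih acc hacc]

-- ===== VERDICT (by name: the statement is the Claim_ definition above) =====
theorem last_three_primes_spec : Claim_equal_last_three_primes := by
  intro numbers _
  show last_three_primes numbers = last_three_primes_alt numbers
  unfold last_three_primes last_three_primes_alt
  show pvLoopA numbers.reverse [] =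
      (PySem.List.slice (numbers.filter pvIsPrime) (some (-3)) none).reverse
  rw [pvLoopA_eq _ [] (by norm_num),
      PySem.List.slice_from_neg_ofNat _ 3 (by norm_num),
      ← List.take_reverse, ← List.filter_reverse]
  simp
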